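-- pv_equiv track=rewrite | github.com/Dan-Patterson/numpy_geometry | arcpro_npg/npg/npg/old/npg_clip_lastgood.py | _before_chk_
-- ===== SOURCE A (Python) =====
-- def _before_chk_(poly_, seen_, id_, a_in_b):
--     """Return the points which are before the point in question.
--
--     Parameters
--     ----------
--     poly : array_like
--         The polygon to check.
--     seen_ : list
--         The id values already to seen.
--     id_ : integer
--         The id value to check
--     a_in_b : list
--     """
--     lst = seen_ + [id_]
--     strt = lst[0] if len(lst) > 1 else 0
--     end_ = lst[-1] + 1
--     bf = [x for x in range(strt, end_) if x not in lst]
--     if len(bf) > 0: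
--         bf = sorted(list(set(a_in_b).intersection(bf)))
--         pnts = [poly_[i] for i in bf]
--         if pnts:
--             return bf, pnts
--     return bf, None
-- ===== SOURCE B (Python) =====
-- def _before_chk_(poly_, seen_, id_, a_in_b):
--     lst = seen_ + [id_]
--     strt = lst[0] if len(lst) > 1 else 0
--     end_ = lst[-1] + 1
--     bf, pnts = [], []
--     for i in sorted(set(a_in_b)):
--         if strt <= i < end_ and i not in lst:
--             bf.append(i)
--             pnts.append(poly_[i])
--     return (bf, pnts) if bf else (bf, None)
-- ===== Notes on version B (the rewrite author's own statement) =====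
-- stated objective: simpler
-- what changed: B sorts set(a_in_b) once up front and then makes a single accumulator pass over that sorted list, collecting the qualifying indices and their poly_ points together, instead of A's staged pipeline that materialises range(strt,end_), filters it with 'x not in lst', intersects with set(a_in_b), sorts the intersection and only then maps poly_.
import Mathlib
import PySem

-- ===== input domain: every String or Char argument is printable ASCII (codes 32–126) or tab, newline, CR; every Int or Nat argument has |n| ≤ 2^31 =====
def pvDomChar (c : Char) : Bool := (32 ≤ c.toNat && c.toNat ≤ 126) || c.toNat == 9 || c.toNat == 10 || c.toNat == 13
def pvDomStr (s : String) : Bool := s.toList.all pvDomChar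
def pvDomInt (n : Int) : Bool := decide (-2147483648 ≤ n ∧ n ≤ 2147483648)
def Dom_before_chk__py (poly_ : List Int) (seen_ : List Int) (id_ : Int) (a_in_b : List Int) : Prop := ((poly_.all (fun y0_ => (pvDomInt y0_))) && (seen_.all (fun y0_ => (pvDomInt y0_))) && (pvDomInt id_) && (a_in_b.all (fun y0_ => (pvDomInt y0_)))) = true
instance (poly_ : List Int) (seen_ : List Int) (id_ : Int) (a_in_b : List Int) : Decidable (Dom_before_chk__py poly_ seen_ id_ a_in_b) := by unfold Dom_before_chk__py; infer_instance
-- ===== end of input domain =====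

-- B sorts set(a_in_b) first and then collects the qualifying indices and their poly_ points in one
-- accumulator pass (simpler decomposition than A's range/filter/intersect/sort/map pipeline);
-- return value only, no mutation.


-- ===== PORT A =====
def before_chk__py (poly_ : List Int) (seen_ : List Int) (id_ : Int) (a_in_b : List Int) : List Int × Option (List Int) :=
  let lst := seen_ ++ [id_]
  let strt := if lst.length > 1 then PySem.List.pyGetD lst 0 0 else 0
  let end_ := PySem.List.pyGetD lst (-1) 0 + 1
  let bf := (PySem.List.pyRange strt end_ 1).filter (fun x => decide (x ∉ lst))
  if bf.length > 0 then
    let bf2 := PySem.List.sorted (PySem.Set.inter (PySem.Set.ofList a_in_b) bf) (fun x => x) false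
    let pnts := bf2.map (fun i => PySem.List.pyGetD poly_ i 0)
    if pnts ≠ [] then (bf2, some pnts) else (bf2, none)
  else (bf, none)

-- ===== PORT B =====
-- the single for-loop of Source B: walk the (already sorted) candidates, appending the index and its
-- poly_ point whenever the interval/not-seen test passes (written as structural recursion,
-- prepending on the way back = appending in order)
def beforeAltLoop (poly_ lst : List Int) (strt end_ : Int) : List Int → List Int × List Int
  | [] => ([], [])
  | i :: rest =>
    let (bf, pnts) := beforeAltLoop poly_ lst strt end_ rest
    if strt ≤ i ∧ i < end_ ∧ i ∉ lst then (i :: bf, PySem.List.pyGetD poly_ i 0 :: pnts)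
    else (bf, pnts)

def before_chk__py_alt (poly_ : List Int) (seen_ : List Int) (id_ : Int) (a_in_b : List Int) : List Int × Option (List Int) :=
  let lst := seen_ ++ [id_]
  let strt := if lst.length > 1 then PySem.List.pyGetD lst 0 0 else 0
  let end_ := PySem.List.pyGetD lst (-1) 0 + 1
  let (bf, pnts) := beforeAltLoop poly_ lst strt end_
      (PySem.List.sorted (PySem.Set.ofList a_in_b) (fun x => x) false)
  if bf ≠ [] then (bf, some pnts) else (bf, none)

-- ===== PRECONDITION & SPEC =====
-- Pre_ excludes exactly the inputs on which A raises IndexError: some index that survives the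
-- start/end/already-seen filter and occurs in a_in_b is not a valid Python index into poly_.
def Pre_before_chk__py (poly_ : List Int) (seen_ : List Int) (id_ : Int) (a_in_b : List Int) : Prop :=
  ∀ i ∈ a_in_b,
    ((if seen_ = [] then 0 else seen_.headI) ≤ i ∧ i < id_ + 1 ∧ i ∉ seen_ ++ [id_]) →
      PySem.Raise.InRange poly_.length i
instance (poly_ : List Int) (seen_ : List Int) (id_ : Int) (a_in_b : List Int) : Decidable (Pre_before_chk__py poly_ seen_ id_ a_in_b) := by unfold Pre_before_chk__py; infer_instance
def pvWitness_before_chk__py : List Int × List Int × Int × List Int := ([10, 20, 30], [0], 2, [1, 1, 4])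

def Spec_before_chk__py (poly_ : List Int) (seen_ : List Int) (id_ : Int) (a_in_b : List Int) (out : List Int × Option (List Int)) : Prop := out = before_chk__py_alt poly_ seen_ id_ a_in_b
instance (poly_ : List Int) (seen_ : List Int) (id_ : Int) (a_in_b : List Int) (out : List Int × Option (List Int)) : Decidable (Spec_before_chk__py poly_ seen_ id_ a_in_b out) := by unfold Spec_before_chk__py; infer_instance

-- ===== CLAIM (what is proved, stated in full; the proofs are below) =====
def Claim_equal_before_chk__py : Prop := ∀ (poly_ : List Int) (seen_ : List Int) (id_ : Int) (a_in_b : List Int), Dom_before_chk__py poly_ seen_ id_ a_in_b → Pre_before_chk__py poly_ seen_ id_ a_in_b → Spec_before_chk__py poly_ seen_ id_ a_in_b (before_chk__py poly_ seen_ id_ a_in_b)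

-- ===== LEMMAS AND PROOFS =====

-- B's loop is filter-then-map of the input list
lemma beforeAltLoop_spec (poly_ lst : List Int) (strt end_ : Int) (l : List Int) :
    beforeAltLoop poly_ lst strt end_ l
      = (l.filter (fun i => decide (strt ≤ i ∧ i < end_ ∧ i ∉ lst)),
         (l.filter (fun i => decide (strt ≤ i ∧ i < end_ ∧ i ∉ lst))).map
           (fun i => PySem.List.pyGetD poly_ i 0)) := by
  induction l with
  | nil => rfl
  | cons i rest ih =>
    simp only [beforeAltLoop, ih, List.filter_cons]
    by_cases h : strt ≤ i ∧ i < end_ ∧ i ∉ lst <;> simp [h]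

-- A's sorted intersection equals B's filter of the sorted dedup:
-- sorted(set(a) ∩ range-filter) = filter p (sorted(set(a)))
lemma sorted_inter_eq_filter_sorted (a_in_b lst : List Int) (strt end_ : Int) :
    PySem.List.sorted (PySem.Set.inter (PySem.Set.ofList a_in_b)
        ((PySem.List.pyRange strt end_ 1).filter (fun x => decide (x ∉ lst)))) (fun x => x) false
      = (PySem.List.sorted (PySem.Set.ofList a_in_b) (fun x => x) false).filter
          (fun i => decide (strt ≤ i ∧ i < end_ ∧ i ∉ lst)) := by
  have hinter : PySem.Set.inter (PySem.Set.ofList a_in_b)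
      ((PySem.List.pyRange strt end_ 1).filter (fun x => decide (x ∉ lst)))
      = (PySem.Set.ofList a_in_b).filter (fun i => decide (strt ≤ i ∧ i < end_ ∧ i ∉ lst)) := by
    show (PySem.Set.ofList a_in_b).filter _ = _
    apply List.filter_congr
    intro x _
    simp [List.mem_filter, PySem.List.mem_pyRange_one, and_assoc]
  rw [hinter]
  apply PySem.List.sorted_eq_of_perm_of_pairwise_lt
  · exact ((PySem.List.sorted_perm (PySem.Set.ofList a_in_b) (fun x => x) false).filter _)
  · exact (PySem.List.sorted_ofList_pairwise_lt (xs := a_in_b)).filter _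

theorem before_chk__py_spec : Claim_equal_before_chk__py := by
  intro poly_ seen_ id_ a_in_b _ _
  unfold Spec_before_chk__py before_chk__py before_chk__py_alt
  simp only [beforeAltLoop_spec, sorted_inter_eq_filter_sorted]
  set lst := seen_ ++ [id_] with hlst
  set strt := if lst.length > 1 then PySem.List.pyGetD lst 0 0 else 0 with hstrt
  set end_ := PySem.List.pyGetD lst (-1) 0 + 1 with hend
  set s := (PySem.List.sorted (PySem.Set.ofList a_in_b) (fun x => x) false).filter
      (fun i => decide (strt ≤ i ∧ i < end_ ∧ i ∉ lst)) with hs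
  by_cases hbf : ((PySem.List.pyRange strt end_ 1).filter (fun x => decide (x ∉ lst))).length > 0
  · simp only [hbf, if_pos]
    by_cases hsnil : s = [] <;> simp [hsnil]
  · have hrange : (PySem.List.pyRange strt end_ 1).filter (fun x => decide (x ∉ lst)) = [] := by
      cases h : (PySem.List.pyRange strt end_ 1).filter (fun x => decide (x ∉ lst)) with
      | nil => rfl
      | cons a l => exfalso; apply hbf; rw [h]; simp
    have hsnil : s = [] := by
      rw [hs]
      apply List.filter_eq_nil_iff.mpr
      intro x _ hx
      have hmem : x ∈ (PySem.List.pyRange strt end_ 1).filter (fun x => decide (x ∉ lst)) := by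
        simp only [decide_eq_true_eq] at hx
        simp [List.mem_filter, PySem.List.mem_pyRange_one, hx.1, hx.2.1, hx.2.2]
      rw [hrange] at hmem; exact absurd hmem (List.not_mem_nil)
    simp [hsnil]
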